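-- pv_equiv track=rewrite | github.com/jerryding95/robinhood | linker/common/helper.py | isRegister
-- ===== SOURCE A (Python) =====
-- def isRegister(arg: str) -> bool:
--     """Checks if the argument is a register name
--
--     Args:
--         arg (str): The name that needs to be checked
--
--     Returns:
--         bool: The name corresponds to a register name
--     """
--     ## ISA V2 Registers
--     registersList = [f"X{index}" for index in range(32)]
--     ## ISA V1 Registers
--     registersList += [f"UDPR_{index}" for index in range(32)]
--     ## ISA V1 Special Registers
--     registersList += [
--         "SBP",
--         "NWID",
--         "LID",
--         "SBPB",
--         "EQT",
--         "TS",
--         "TID",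
--         "SBCR",
--         "SBP",
--         "SBPB",
--         "SBCR",
--     ]
--     ## ISA V1 operand buffers
--     registersList += [f"OB{index}" for index in range(10)]
--     return arg in registersList
-- ===== SOURCE B (Python) =====
-- _SPECIALS = {"SBP", "NWID", "LID", "SBPB", "EQT", "TS", "TID", "SBCR"}
--
-- def _canon_index(s: str, hi: int) -> bool:
--     """True iff s is exactly str(n) for some 0 <= n < hi."""
--     if not (s.isascii() and s.isdigit()):
--         return False
--     n = int(s)
--     return 0 <= n < hi and str(n) == s
--
-- def isRegister(arg: str) -> bool:
--     if arg in _SPECIALS: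
--         return True
--     if arg.startswith("X"):
--         return _canon_index(arg[1:], 32)
--     if arg.startswith("UDPR_"):
--         return _canon_index(arg[5:], 32)
--     if arg.startswith("OB"):
--         return _canon_index(arg[2:], 10)
--     return False
-- ===== Notes on version B (the rewrite author's own statement) =====
-- stated objective: idiomatic
-- what changed: B validates by parsing (a literal set of special names plus prefix + canonical-decimal-suffix checks) instead of building the 85-element name list and scanning it for membership.
import Mathlib
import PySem

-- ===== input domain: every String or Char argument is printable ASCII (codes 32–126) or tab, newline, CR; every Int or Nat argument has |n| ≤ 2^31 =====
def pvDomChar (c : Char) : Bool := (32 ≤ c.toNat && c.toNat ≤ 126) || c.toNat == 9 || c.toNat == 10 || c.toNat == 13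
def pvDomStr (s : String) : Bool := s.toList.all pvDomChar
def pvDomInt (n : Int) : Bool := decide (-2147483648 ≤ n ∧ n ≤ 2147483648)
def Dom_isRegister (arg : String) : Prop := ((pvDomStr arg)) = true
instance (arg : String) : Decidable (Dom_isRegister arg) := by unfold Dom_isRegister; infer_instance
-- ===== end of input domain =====

-- B replaces A's build-85-names-then-scan membership test by parsing: a literal set of special
-- names plus a canonical-decimal suffix check after the prefix — idiomatic, same exact behaviour.


-- ===== PORT A =====
-- the list A builds: X0..X31, UDPR_0..UDPR_31, the special names (with repeats), OB0..OB9
def registersListA : List (List Char) :=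
  ((PySem.List.pyRange 0 32 1).map (fun index => "X".toList ++ PySem.Int.toChars index)) ++
  ((PySem.List.pyRange 0 32 1).map (fun index => "UDPR_".toList ++ PySem.Int.toChars index)) ++
  ["SBP".toList, "NWID".toList, "LID".toList, "SBPB".toList, "EQT".toList, "TS".toList,
   "TID".toList, "SBCR".toList, "SBP".toList, "SBPB".toList, "SBCR".toList] ++
  ((PySem.List.pyRange 0 10 1).map (fun index => "OB".toList ++ PySem.Int.toChars index))

def isRegister (arg : String) : Bool := registersListA.contains arg.toList

-- ===== PORT B =====
def pvSpecials : List (List Char) :=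
  ["SBP".toList, "NWID".toList, "LID".toList, "SBPB".toList, "EQT".toList, "TS".toList,
   "TID".toList, "SBCR".toList]

-- s.isascii(): every code point < 128 (no PySem primitive; exact by Python's definition)
def pvIsAscii (s : List Char) : Bool := s.all (fun c => c.toNat < 128)

-- _canon_index(s, hi): s is exactly str(n) for some 0 <= n < hi
-- (the 'none' branch is unreachable in Python: int(s) cannot raise on a nonempty ASCII digit string)
def pvCanonIndex (s : List Char) (hi : Int) : Bool :=
  if !(pvIsAscii s && PySem.Chars.strIsdigit s) then false
  else
    match PySem.Int.ofChars? s with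
    | some n => decide (0 ≤ n) && decide (n < hi) && (PySem.Int.toChars n == s)
    | none => false

def isRegisterAltCore (s : List Char) : Bool :=
  if PySem.Set.contains (PySem.Set.ofList pvSpecials) s then true
  else if PySem.Chars.startswith s "X".toList then
    pvCanonIndex (PySem.Chars.slice s (some 1) none) 32
  else if PySem.Chars.startswith s "UDPR_".toList then
    pvCanonIndex (PySem.Chars.slice s (some 5) none) 32
  else if PySem.Chars.startswith s "OB".toList then
    pvCanonIndex (PySem.Chars.slice s (some 2) none) 10
  else false

def isRegister_alt (arg : String) : Bool := isRegisterAltCore arg.toList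

-- ===== PRECONDITION & SPEC =====
def Spec_isRegister (arg : String) (out : Bool) : Prop := out = isRegister_alt arg
instance (arg : String) (out : Bool) : Decidable (Spec_isRegister arg out) := by unfold Spec_isRegister; infer_instance

-- ===== CLAIM (what is proved, stated in full; the proofs are below) =====
def Claim_equal_isRegister : Prop := ∀ (arg : String), Dom_isRegister arg → Spec_isRegister arg (isRegister arg)

-- ===== LEMMAS AND PROOFS =====

-- every name A lists passes B's parser
theorem all_registers_alt : registersListA.all isRegisterAltCore = true := by decide

-- B's suffix parser characterised: it accepts exactly p ++ str(n), 0 ≤ n < hi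
theorem canon_of_prefix (p l : List Char) (hi : Int)
    (hpre : PySem.Chars.startswith l p = true)
    (h : pvCanonIndex (PySem.List.slice l (some (p.length : Int)) none) hi = true) :
    ∃ n : Int, 0 ≤ n ∧ n < hi ∧ l = p ++ PySem.Int.toChars n := by
  obtain ⟨r, hr⟩ := (PySem.Chars.startswith_iff l p).mp hpre
  subst hr
  rw [PySem.List.slice_from_natCast, List.drop_left] at h
  unfold pvCanonIndex at h
  split_ifs at h
  rcases hof : PySem.Int.ofChars? r with _ | n <;> rw [hof] at h
  · exact absurd h (by simp)
  · simp only [Bool.and_eq_true, decide_eq_true_eq, beq_iff_eq] at h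
    exact ⟨n, h.1.1, h.1.2, by rw [h.2]⟩

-- B accepts only names on A's list
theorem alt_imp_mem (l : List Char) (h : isRegisterAltCore l = true) : l ∈ registersListA := by
  unfold isRegisterAltCore at h
  split_ifs at h with h1 h2 h3 h4
  · -- one of the eight special names
    have hm : l ∈ pvSpecials := (PySem.Set.mem_ofList pvSpecials l).mp ((PySem.Set.contains_iff _ l).mp h1)
    unfold registersListA
    simp only [pvSpecials, List.mem_cons, List.not_mem_nil, or_false] at hm
    rcases hm with rfl | rfl | rfl | rfl | rfl | rfl | rfl | rfl <;> decide
  · -- "X" ++ str(n), 0 ≤ n < 32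
    rw [PySem.Chars.slice_eq_listSlice] at h
    obtain ⟨n, hn0, hn, rfl⟩ := canon_of_prefix "X".toList l 32 h2 h
    unfold registersListA
    refine List.mem_append_left _ (List.mem_append_left _ (List.mem_append_left _ ?_))
    exact List.mem_map.mpr ⟨n, (PySem.List.mem_pyRange_one ..).mpr ⟨hn0, hn⟩, rfl⟩
  · -- "UDPR_" ++ str(n), 0 ≤ n < 32
    rw [PySem.Chars.slice_eq_listSlice] at h
    obtain ⟨n, hn0, hn, rfl⟩ := canon_of_prefix "UDPR_".toList l 32 h3 h
    unfold registersListA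
    refine List.mem_append_left _ (List.mem_append_left _ (List.mem_append_right _ ?_))
    exact List.mem_map.mpr ⟨n, (PySem.List.mem_pyRange_one ..).mpr ⟨hn0, hn⟩, rfl⟩
  · -- "OB" ++ str(n), 0 ≤ n < 10
    rw [PySem.Chars.slice_eq_listSlice] at h
    obtain ⟨n, hn0, hn, rfl⟩ := canon_of_prefix "OB".toList l 10 h4 h
    unfold registersListA
    refine List.mem_append_right _ ?_
    exact List.mem_map.mpr ⟨n, (PySem.List.mem_pyRange_one ..).mpr ⟨hn0, hn⟩, rfl⟩

theorem core_eq (l : List Char) : registersListA.contains l = isRegisterAltCore l := by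
  by_cases h : isRegisterAltCore l = true
  · rw [h, List.contains_iff_mem]; exact alt_imp_mem l h
  · rw [Bool.eq_false_iff.mpr h]
    by_cases hc : l ∈ registersListA
    · exact absurd (List.all_eq_true.mp all_registers_alt l hc) h
    · simpa [List.contains_iff_mem]

-- ===== VERDICT (by name: the statement is the Claim_ definition above) =====
theorem isRegister_spec : Claim_equal_isRegister := by
  intro arg _
  unfold Spec_isRegister isRegister isRegister_alt
  exact core_eq arg.toList
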